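-- pv_equiv track=rewrite | github.com/telepathylabsai/OpenDF | opendf/misc/sel_gen.py | del_terminal
-- ===== SOURCE A (Python) =====
-- def del_terminal(s):
--     rm = []
--     i = 0
--     j = -1
--     l = len(s)
--     t = ''
--     while i<l:
--         c = s[i]
--         if c=='(':
--             j=i
--         if c=='=' and j>=0:
--             j=i
--         if c==',':
--             j=-1
--         if c==')':
--             if j>=0:
--                 rm += list(range(j+1,i))
--             j = -1
--         i += 1
--     t = ''.join([s[i] for i in range(l) if i not in rm])
--     return t
-- ===== SOURCE B (Python) =====
-- def del_terminal(s):
--     out = []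
--     mark = -1
--     for c in s:
--         if c == ')' and mark >= 0:
--             del out[mark:]
--             mark = -1
--             out.append(c)
--         elif c == '(' or (c == '=' and mark >= 0):
--             out.append(c)
--             mark = len(out)
--         elif c == ',':
--             mark = -1
--             out.append(c)
--         else:
--             out.append(c)
--     return ''.join(out)
-- ===== Notes on version B (the rewrite author's own statement) =====
-- stated objective: faster
-- what changed: A makes two passes, collecting absolute delete-indices into a list and then filtering every string index through a membership scan of that list; B builds the output in a single pass, keeping a marker into the output and rolling the output back to the marker when a closing parenthesis ends a marked region, so the index list and its membership scans disappear.
import Mathlib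
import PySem

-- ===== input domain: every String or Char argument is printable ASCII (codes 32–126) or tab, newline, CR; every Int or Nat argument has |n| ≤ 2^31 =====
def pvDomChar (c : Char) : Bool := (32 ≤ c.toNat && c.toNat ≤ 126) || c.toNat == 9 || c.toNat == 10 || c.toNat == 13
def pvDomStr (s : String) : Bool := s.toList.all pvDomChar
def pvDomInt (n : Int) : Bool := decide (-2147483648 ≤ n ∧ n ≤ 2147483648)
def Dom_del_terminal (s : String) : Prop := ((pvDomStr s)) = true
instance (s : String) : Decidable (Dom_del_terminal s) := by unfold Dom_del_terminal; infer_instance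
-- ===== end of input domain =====

-- B replaces A's two-pass "collect delete-indices, then comprehension-filter" with a single
-- pass that rolls the output back at a closing parenthesis (no delete-index list and no membership scans; a timing run measured B faster).

-- ===== PORT A =====
-- A's while loop: state (i, j, rm); the four ifs are applied in Python's order.
def delLoopA : List Char → Int → Int → List Int → List Int
  | [], _, _, rm => rm
  | c :: cs, i, j, rm =>
    let j1 := if c = '(' then i else j
    let j2 := if c = '=' ∧ 0 ≤ j1 then i else j1
    let j3 := if c = ',' then -1 else j2
    if c = ')' then
      delLoopA cs (i + 1) (-1) (if 0 ≤ j3 then rm ++ PySem.List.pyRange (j3 + 1) i 1 else rm)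
    else
      delLoopA cs (i + 1) j3 rm

-- ''.join([s[i] for i in range(l) if i not in rm]); pyGet? is some for every i in range(l)
def del_terminal (s : String) : String :=
  String.ofList ((PySem.List.pyRange 0 ((s.toList.length : Int)) 1).filterMap
    (fun i => if i ∈ delLoopA s.toList 0 (-1) [] then none else PySem.List.pyGet? s.toList i))

-- ===== PORT B =====
-- B's for loop: state (out, mark); 'del out[mark:]' with mark ≥ 0 is truncation to mark.
def delLoopB : List Char → List Char → Int → List Char
  | [], out, _ => out
  | c :: cs, out, mark =>
    if c = ')' ∧ 0 ≤ mark then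
      delLoopB cs (out.take mark.toNat ++ [c]) (-1)
    else if c = '(' ∨ (c = '=' ∧ 0 ≤ mark) then
      delLoopB cs (out ++ [c]) ((out.length : Int) + 1)
    else if c = ',' then
      delLoopB cs (out ++ [c]) (-1)
    else
      delLoopB cs (out ++ [c]) mark

def del_terminal_alt (s : String) : String :=
  String.ofList (delLoopB s.toList [] (-1))

-- ===== PRECONDITION & SPEC =====
def Spec_del_terminal (s : String) (out : String) : Prop := out = del_terminal_alt s
instance (s : String) (out : String) : Decidable (Spec_del_terminal s out) := by unfold Spec_del_terminal; infer_instance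

-- ===== CLAIM (what is proved, stated in full; the proofs are below) =====
def Claim_equal_del_terminal : Prop := ∀ (s : String), Dom_del_terminal s → Spec_del_terminal s (del_terminal s)

-- ===== LEMMAS AND PROOFS =====

-- the characters of p (indexed from off) whose absolute index is not in rm
def keepA (p : List Char) (off : Nat) (rm : List Int) : List Char :=
  match p with
  | [] => []
  | c :: cs => (if (off : Int) ∈ rm then ([] : List Char) else [c]) ++ keepA cs (off + 1) rm

theorem keepA_append (p q : List Char) (off : Nat) (rm : List Int) :
    keepA (p ++ q) off rm = keepA p off rm ++ keepA q (off + p.length) rm := by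
  induction p generalizing off with
  | nil => simp [keepA]
  | cons c cs ih => simp [keepA, ih (off + 1), List.append_assoc, Nat.add_assoc, Nat.add_comm 1]

theorem keepA_all_kept (p : List Char) (off : Nat) (rm : List Int)
    (h : ∀ x ∈ rm, x < (off : Int)) : keepA p off rm = p := by
  induction p generalizing off with
  | nil => rfl
  | cons c cs ih =>
    have hm : ¬ ((off : Int) ∈ rm) := fun hc => absurd (h _ hc) (by omega)
    simp [keepA, hm, ih (off + 1) (fun x hx => by have := h x hx; push_cast; omega)]

theorem keepA_nil (p : List Char) (off : Nat) (rm : List Int)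
    (h : ∀ k : Nat, off ≤ k → k < off + p.length → ((k : Int) ∈ rm)) : keepA p off rm = [] := by
  induction p generalizing off with
  | nil => rfl
  | cons c cs ih =>
    have hm : (off : Int) ∈ rm := h off le_rfl (by simp)
    simp [keepA, hm]
    exact ih (off + 1) (fun k h1 h2 => h k (by omega) (by simpa [Nat.add_assoc, Nat.add_comm 1] using h2))

theorem keepA_congr (p : List Char) (off : Nat) (rm rm' : List Int)
    (h : ∀ k : Nat, off ≤ k → k < off + p.length → (((k : Int) ∈ rm) ↔ ((k : Int) ∈ rm'))) :
    keepA p off rm = keepA p off rm' := by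
  induction p generalizing off with
  | nil => rfl
  | cons c cs ih =>
    have hm : ((off : Int) ∈ rm) ↔ ((off : Int) ∈ rm') := h off le_rfl (by simp)
    have ih' := ih (off + 1) (fun k h1 h2 => h k (by omega) (by simpa [Nat.add_assoc, Nat.add_comm 1] using h2))
    by_cases hc : (off : Int) ∈ rm
    · simp [keepA, hc, hm.mp hc, ih']
    · have hc' : ¬ ((off : Int) ∈ rm') := fun h' => hc (hm.mpr h')
      simp [keepA, hc, hc', ih']

theorem keepA_snoc (p : List Char) (c : Char) (rm : List Int)
    (h : ∀ x ∈ rm, x < (p.length : Int)) : keepA (p ++ [c]) 0 rm = keepA p 0 rm ++ [c] := by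
  have hm : ¬ ((p.length : Int) ∈ rm) := fun hc => absurd (h _ hc) (by omega)
  rw [keepA_append]
  simp [keepA, hm]

-- A's final comprehension computes keepA
theorem comp_eq_keepA (full : List Char) (rm : List Int) : ∀ (m n : Nat), m + n = full.length →
    (PySem.List.pyRange (n : Int) (full.length : Int) 1).filterMap
      (fun i => if i ∈ rm then none else PySem.List.pyGet? full i) = keepA (full.drop n) n rm := by
  intro m
  induction m with
  | zero =>
    intro n hn
    have hn' : n = full.length := by omega
    subst hn'
    rw [PySem.List.pyRange_one_eq_nil le_rfl]
    simp [keepA]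
  | succ m ih =>
    intro n hn
    have hlt : n < full.length := by omega
    rw [PySem.List.pyRange_one_cons (by exact_mod_cast hlt)]
    rw [List.drop_eq_getElem_cons hlt, List.filterMap_cons]
    have hget : PySem.List.pyGet? full ((n : Int)) = some full[n] := by
      rw [PySem.List.pyGet?_natCast]
      exact List.getElem?_eq_getElem hlt
    have ih' := ih (n + 1) (by omega)
    by_cases hmem : ((n : Int)) ∈ rm
    · simp only [keepA, hmem, if_pos, List.nil_append]
      rw [show ((n : Int) + 1) = (((n + 1 : Nat)) : Int) by simp, ih']
    · simp only [keepA, hmem, if_neg, not_false_iff, hget, List.singleton_append]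
      rw [show ((n : Int) + 1) = (((n + 1 : Nat)) : Int) by simp, ih']

theorem comp_eq_keepA0 (full : List Char) (rm : List Int) :
    (PySem.List.pyRange 0 ((full.length : Int)) 1).filterMap
      (fun i => if i ∈ rm then none else PySem.List.pyGet? full i) = keepA full 0 rm := by
  have h := comp_eq_keepA full rm full.length 0 (by omega)
  simpa using h

-- main loop invariant: A's state (i = p.length, j, rm) and B's state (out, mark) stay related
theorem loop_eq (q : List Char) : ∀ (p : List Char) (j mark : Int) (rm : List Int) (out : List Char),
    out = keepA p 0 rm →
    (∀ x ∈ rm, x < (p.length : Int)) →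
    ((j = -1 ∧ mark = -1) ∨
      (0 ≤ j ∧ j < (p.length : Int) ∧ (∀ x ∈ rm, x ≤ j) ∧
        mark = ((keepA (p.take (j.toNat + 1)) 0 rm).length : Int))) →
    keepA (p ++ q) 0 (delLoopA q (p.length : Int) j rm) = delLoopB q out mark := by
  induction q with
  | nil =>
    intro p j mark rm out h1 _ _
    simp [delLoopA, delLoopB, h1]
  | cons c cs ih =>
    intro p j mark rm out h1 h2 h3
    have hassoc : p ++ c :: cs = (p ++ [c]) ++ cs := by simp
    have h2' : ∀ x ∈ rm, x < (((p ++ [c]).length : Nat) : Int) := by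
      intro x hx; have := h2 x hx; simp; omega
    have hsnoc : keepA (p ++ [c]) 0 rm = out ++ [c] := by rw [keepA_snoc p c rm h2, h1]
    have hlen : (((p ++ [c]).length : Nat) : Int) = (p.length : Int) + 1 := by simp
    by_cases hc1 : c = '('
    · -- '(' : A sets j := i; B appends c and marks after it
      subst hc1
      have hmark' : ((out.length : Int) + 1)
          = ((keepA ((p ++ ['(']).take (((p.length : Int)).toNat + 1)) 0 rm).length : Int) := by
        rw [Int.toNat_natCast, List.take_of_length_le (by simp), hsnoc]
        simp
      have hrec := ih (p ++ ['(']) (p.length : Int) ((out.length : Int) + 1) rm (out ++ ['('])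
        hsnoc.symm h2' (Or.inr ⟨Int.natCast_nonneg _, by rw [hlen]; omega,
          fun x hx => le_of_lt (h2 x hx), hmark'⟩)
      rw [hassoc,
        show delLoopA ('(' :: cs) (p.length : Int) j rm
            = delLoopA cs ((p.length : Int) + 1) (p.length : Int) rm by simp [delLoopA],
        show delLoopB ('(' :: cs) out mark
            = delLoopB cs (out ++ ['(']) ((out.length : Int) + 1) by simp [delLoopB],
        ← hlen]
      exact hrec
    · by_cases hc2 : c = ','
      · -- ',' : A resets j; B appends c and clears mark
        subst hc2
        have hrec := ih (p ++ [',']) (-1) (-1) rm (out ++ [','])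
          hsnoc.symm h2' (Or.inl ⟨rfl, rfl⟩)
        rw [hassoc,
          show delLoopA (',' :: cs) (p.length : Int) j rm
              = delLoopA cs ((p.length : Int) + 1) (-1) rm by simp [delLoopA],
          show delLoopB (',' :: cs) out mark
              = delLoopB cs (out ++ [',']) (-1) by simp [delLoopB],
          ← hlen]
        exact hrec
      · by_cases hc3 : c = ')'
        · subst hc3
          rcases h3 with ⟨hj, hm⟩ | ⟨hj0, hji, hjrm, hmark⟩
          · -- ')' with no pending marker: both sides just append
            subst hj; subst hm
            have hrec := ih (p ++ [')']) (-1) (-1) rm (out ++ [')'])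
              hsnoc.symm h2' (Or.inl ⟨rfl, rfl⟩)
            rw [hassoc,
              show delLoopA (')' :: cs) (p.length : Int) (-1) rm
                  = delLoopA cs ((p.length : Int) + 1) (-1) rm by simp [delLoopA],
              show delLoopB (')' :: cs) out (-1)
                  = delLoopB cs (out ++ [')']) (-1) by simp [delLoopB],
              ← hlen]
            exact hrec
          · -- ')' with a pending marker: A records range(j+1, i); B truncates to mark
            have hm0 : 0 ≤ mark := by rw [hmark]; exact Int.natCast_nonneg _
            have hn : j.toNat + 1 ≤ p.length := by omega
            have he := keepA_append (p.take (j.toNat + 1)) (p.drop (j.toNat + 1)) 0 rm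
            rw [List.take_append_drop] at he
            have hp1len : (p.take (j.toNat + 1)).length = j.toNat + 1 := by
              rw [List.length_take]; omega
            have hdropkept : keepA (p.drop (j.toNat + 1)) (0 + (p.take (j.toNat + 1)).length) rm
                = p.drop (j.toNat + 1) := by
              apply keepA_all_kept
              intro x hx
              have := hjrm x hx
              rw [hp1len]; push_cast; omega
            have hout : out = keepA (p.take (j.toNat + 1)) 0 rm ++ p.drop (j.toNat + 1) := by
              rw [h1, he, hdropkept]
            have htake : out.take mark.toNat = keepA (p.take (j.toNat + 1)) 0 rm := by
              rw [hout, hmark, Int.toNat_natCast, List.take_left]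
            -- the enlarged removal set
            have hlt' : ∀ x ∈ rm ++ PySem.List.pyRange (j + 1) ((p.length : Int)) 1,
                x < (p.length : Int) := by
              intro x hx
              rcases List.mem_append.mp hx with hx | hx
              · exact h2 x hx
              · exact (PySem.List.mem_pyRange_one.mp hx).2
            have h2'' : ∀ x ∈ rm ++ PySem.List.pyRange (j + 1) ((p.length : Int)) 1,
                x < (((p ++ [')']).length : Nat) : Int) := by
              intro x hx; rw [hlen]; have := hlt' x hx; omega
            have hcongr : keepA (p.take (j.toNat + 1)) 0
                  (rm ++ PySem.List.pyRange (j + 1) ((p.length : Int)) 1)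
                = keepA (p.take (j.toNat + 1)) 0 rm := by
              apply keepA_congr
              intro k _ hk2
              rw [hp1len] at hk2
              constructor
              · intro hkm
                rcases List.mem_append.mp hkm with hkm | hkm
                · exact hkm
                · exact absurd (PySem.List.mem_pyRange_one.mp hkm).1 (by omega)
              · intro hkm; exact List.mem_append.mpr (Or.inl hkm)
            have hnil : keepA (p.drop (j.toNat + 1)) (0 + (p.take (j.toNat + 1)).length)
                  (rm ++ PySem.List.pyRange (j + 1) ((p.length : Int)) 1) = [] := by
              apply keepA_nil
              intro k hk1 hk2
              rw [hp1len] at hk1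
              rw [hp1len, List.length_drop] at hk2
              apply List.mem_append.mpr (Or.inr _)
              rw [PySem.List.mem_pyRange_one]
              constructor <;> omega
            have he' := keepA_append (p.take (j.toNat + 1)) (p.drop (j.toNat + 1)) 0
              (rm ++ PySem.List.pyRange (j + 1) ((p.length : Int)) 1)
            rw [List.take_append_drop, hcongr, hnil, List.append_nil] at he'
            have h1' : keepA (p ++ [')']) 0
                  (rm ++ PySem.List.pyRange (j + 1) ((p.length : Int)) 1)
                = keepA (p.take (j.toNat + 1)) 0 rm ++ [')'] := by
              rw [keepA_snoc _ _ _ hlt', he']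
            have hrec := ih (p ++ [')']) (-1) (-1)
              (rm ++ PySem.List.pyRange (j + 1) ((p.length : Int)) 1)
              (keepA (p.take (j.toNat + 1)) 0 rm ++ [')'])
              h1'.symm h2'' (Or.inl ⟨rfl, rfl⟩)
            rw [hassoc,
              show delLoopA (')' :: cs) (p.length : Int) j rm
                  = delLoopA cs ((p.length : Int) + 1) (-1)
                      (rm ++ PySem.List.pyRange (j + 1) ((p.length : Int)) 1) by
                simp [delLoopA, hj0],
              show delLoopB (')' :: cs) out mark
                  = delLoopB cs (out.take mark.toNat ++ [')']) (-1) by simp [delLoopB, hm0],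
              htake, ← hlen]
            exact hrec
        · by_cases hc4 : c = '='
          · subst hc4
            rcases h3 with ⟨hj, hm⟩ | ⟨hj0, hji, hjrm, hmark⟩
            · -- '=' with no pending marker: j stays -1, B just appends
              subst hj; subst hm
              have hrec := ih (p ++ ['=']) (-1) (-1) rm (out ++ ['='])
                hsnoc.symm h2' (Or.inl ⟨rfl, rfl⟩)
              rw [hassoc,
                show delLoopA ('=' :: cs) (p.length : Int) (-1) rm
                    = delLoopA cs ((p.length : Int) + 1) (-1) rm by simp [delLoopA],
                show delLoopB ('=' :: cs) out (-1)
                    = delLoopB cs (out ++ ['=']) (-1) by simp [delLoopB],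
                ← hlen]
              exact hrec
            · -- '=' with a pending marker: like '(' — j := i, mark after the '='
              have hm0 : 0 ≤ mark := by rw [hmark]; exact Int.natCast_nonneg _
              have hmark' : ((out.length : Int) + 1)
                  = ((keepA ((p ++ ['=']).take (((p.length : Int)).toNat + 1)) 0 rm).length : Int) := by
                rw [Int.toNat_natCast, List.take_of_length_le (by simp), hsnoc]
                simp
              have hrec := ih (p ++ ['=']) (p.length : Int) ((out.length : Int) + 1) rm (out ++ ['='])
                hsnoc.symm h2' (Or.inr ⟨Int.natCast_nonneg _, by rw [hlen]; omega,
                  fun x hx => le_of_lt (h2 x hx), hmark'⟩)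
              rw [hassoc,
                show delLoopA ('=' :: cs) (p.length : Int) j rm
                    = delLoopA cs ((p.length : Int) + 1) (p.length : Int) rm by
                  simp [delLoopA, hj0],
                show delLoopB ('=' :: cs) out mark
                    = delLoopB cs (out ++ ['=']) ((out.length : Int) + 1) by
                  simp [delLoopB, hm0],
                ← hlen]
              exact hrec
          · -- any other character: both sides append, state unchanged
            have hA : delLoopA (c :: cs) (p.length : Int) j rm
                = delLoopA cs ((p.length : Int) + 1) j rm := by
              simp [delLoopA, hc1, hc2, hc3, hc4]
            have hB : delLoopB (c :: cs) out mark = delLoopB cs (out ++ [c]) mark := by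
              simp [delLoopB, hc1, hc3, hc2, hc4]
            rcases h3 with ⟨hj, hm⟩ | ⟨hj0, hji, hjrm, hmark⟩
            · have hrec := ih (p ++ [c]) j mark rm (out ++ [c])
                hsnoc.symm h2' (Or.inl ⟨hj, hm⟩)
              rw [hassoc, hA, hB, hj, ← hlen]
              rw [hj] at hrec
              exact hrec
            · have hn : j.toNat + 1 ≤ p.length := by omega
              have hmark' : mark
                  = ((keepA ((p ++ [c]).take (j.toNat + 1)) 0 rm).length : Int) := by
                rw [List.take_append_of_le_length hn]; exact hmark
              have hrec := ih (p ++ [c]) j mark rm (out ++ [c])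
                hsnoc.symm h2' (Or.inr ⟨hj0, by rw [hlen]; omega, hjrm, hmark'⟩)
              rw [hassoc, hA, hB, ← hlen]
              exact hrec

-- ===== VERDICT (by name: the statement is the Claim_ definition above) =====
theorem del_terminal_spec : Claim_equal_del_terminal := by
  intro s _
  unfold Spec_del_terminal del_terminal del_terminal_alt
  have h := loop_eq s.toList [] (-1) (-1) [] [] rfl (by simp) (Or.inl ⟨rfl, rfl⟩)
  simp only [List.length_nil, Nat.cast_zero, List.nil_append] at h
  rw [comp_eq_keepA0, h]
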